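-- pv_equiv track=rewrite | github.com/sungwoo-me/Algorithm | 함수/1065.py | func
-- ===== SOURCE A (Python) =====
-- def func(num):
--     if num<100:
--         return True
--     else:
--         str_nums=[int(i) for i in str(num)]
--         str_nums2 = [str_nums[i]-str_nums[i-1] for i in range(len(str_nums)-1,0,-1)]
--         str_nums2 = list(set(str_nums2))
--         if len(str_nums2)==1:
--             return True
--         else :
--             return False
-- ===== SOURCE B (Python) =====
-- def func(num):
--     # B: compare the digit list against the reconstructed affine sequence
--     # d0, d0+d, d0+2d, ... (digits are an AP iff digit[i] == digit[0] + i*d).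
--     if num < 100:
--         return True
--     ds = [int(c) for c in str(num)]
--     d = ds[1] - ds[0]
--     return ds == [ds[0] + i * d for i in range(len(ds))]
-- ===== Notes on version B (the rewrite author's own statement) =====
-- stated objective: alternative
-- what changed: A builds the reversed list of consecutive digit differences, deduplicates it through a set and tests the set's size; B never computes consecutive differences at all: it uses the closed-form characterisation of an arithmetic progression, reconstructing the expected affine digit list [ds[0]+i*d for i in range(len)] from the first difference and comparing it with the actual digit list for equality.
import Mathlib
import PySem

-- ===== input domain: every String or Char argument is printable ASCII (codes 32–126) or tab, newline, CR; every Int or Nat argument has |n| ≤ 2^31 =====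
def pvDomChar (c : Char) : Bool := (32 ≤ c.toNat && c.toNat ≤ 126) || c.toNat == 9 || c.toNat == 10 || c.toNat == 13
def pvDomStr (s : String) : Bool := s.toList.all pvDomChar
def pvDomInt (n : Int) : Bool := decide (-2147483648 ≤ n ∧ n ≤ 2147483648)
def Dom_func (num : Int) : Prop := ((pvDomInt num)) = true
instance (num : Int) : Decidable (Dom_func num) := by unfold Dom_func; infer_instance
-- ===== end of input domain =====

-- B replaces A's difference-list / set-dedup / set-size pipeline by the closed-form
-- characterisation of an arithmetic progression: it reconstructs the expected affine
-- digit list from the first difference and compares it with the actual digits (objective: alternative).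

-- ===== PORT A =====
def func (num : Int) : Bool :=
  if num < 100 then true
  else
    -- int(i) for i in str(num): each i is a single digit character here, so int() never raises
    let str_nums : List Int :=
      (PySem.Int.toChars num).map (fun c => (PySem.Int.ofChars? [c]).getD 0)
    -- str_nums[i] / str_nums[i-1] for i in range(len-1, 0, -1): indices always in range
    let str_nums2 : List Int :=
      (PySem.List.pyRange (PySem.List.len str_nums - 1) 0 (-1)).map
        (fun i => PySem.List.pyGetD str_nums i 0 - PySem.List.pyGetD str_nums (i - 1) 0)
    let str_nums2s : List Int := PySem.Set.ofList str_nums2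
    if PySem.List.len str_nums2s == 1 then true else false

-- ===== PORT B =====
def func_alt (num : Int) : Bool :=
  if num < 100 then true
  else
    let ds : List Int :=
      (PySem.Int.toChars num).map (fun c => (PySem.Int.ofChars? [c]).getD 0)
    let d : Int := PySem.List.pyGetD ds 1 0 - PySem.List.pyGetD ds 0 0
    ds == (PySem.List.pyRange 0 (PySem.List.len ds)).map
      (fun i => PySem.List.pyGetD ds 0 0 + i * d)

-- ===== PRECONDITION & SPEC =====
def Spec_func (num : Int) (out : Bool) : Prop := out = func_alt num
instance (num : Int) (out : Bool) : Decidable (Spec_func num out) := by unfold Spec_func; infer_instance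

-- ===== CLAIM (what is proved, stated in full; the proofs are below) =====
def Claim_equal_func : Prop := ∀ (num : Int), Dom_func num → Spec_func num (func num)

-- ===== LEMMAS AND PROOFS =====

-- Nat.toDigitsCore with positive fuel grows the accumulator by at least one character.
lemma toDigitsCore_len_lb (b : Nat) :
    ∀ (f n : Nat) (l : List Char), 0 < f →
      l.length + 1 ≤ (Nat.toDigitsCore b f n l).length := by
  intro f
  induction f with
  | zero => intro n l h; omega
  | succ f ih =>
    intro n l _
    rw [Nat.toDigitsCore]
    split
    · simp
    · rcases Nat.eq_zero_or_pos f with hf | hf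
      · subst hf; rw [Nat.toDigitsCore]; simp
      · have h := ih (n / b) ((n % b).digitChar :: l) hf
        simp only [List.length_cons] at h
        omega

-- str(num) has at least two characters when num ≥ 100.
lemma toChars_two_le (num : Int) (h : 100 ≤ num) :
    2 ≤ (PySem.Int.toChars num).length := by
  have hn : ¬ num < 0 := by omega
  simp only [PySem.Int.toChars, if_neg hn]
  have h100 : 100 ≤ num.toNat := by omega
  unfold Nat.toDigits
  have hdiv : ¬ num.toNat / 10 = 0 := by
    have : 100 / 10 ≤ num.toNat / 10 := Nat.div_le_div_right h100
    omega
  rw [Nat.toDigitsCore]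
  simp only [hdiv, if_false]
  have hlb := toDigitsCore_len_lb 10 num.toNat (num.toNat / 10)
      [(num.toNat % 10).digitChar] (by omega)
  simpa using hlb

-- list(set(l)) has as many elements as l.toFinset.
lemma ofList_length_eq_toFinset_card (l : List Int) :
    (PySem.Set.ofList l).length = l.toFinset.card := by
  rw [← List.toFinset_card_of_nodup (PySem.Set.nodup_ofList l)]
  congr 1
  ext x
  simp [PySem.Set.mem_ofList]

lemma cons_toFinset_card_eq_one (a : Int) (t : List Int) :
    (a :: t).toFinset.card = 1 ↔ ∀ x ∈ t, x = a := by
  constructor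
  · intro h
    rcases Finset.card_eq_one.mp h with ⟨b, hb⟩
    have ha : a ∈ (a :: t).toFinset := by simp
    rw [hb] at ha
    simp only [Finset.mem_singleton] at ha
    subst ha
    intro x hx
    have hx' : x ∈ (a :: t).toFinset := by simp [hx]
    rw [hb] at hx'
    simpa using hx'
  · intro h
    have hset : (a :: t).toFinset = {a} := by
      ext x
      simp only [List.toFinset_cons, Finset.mem_insert, List.mem_toFinset,
        Finset.mem_singleton]
      constructor
      · rintro (rfl | hx)
        · rfl
        · exact h x hx
      · intro hx; exact Or.inl hx
    rw [hset]; simp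

-- A's set-size test equals "every consecutive difference from index 2 on equals the first one".
lemma keyA (ds : List Int) (h2 : 2 ≤ ds.length) :
    (if PySem.List.len (PySem.Set.ofList
        ((PySem.List.pyRange (PySem.List.len ds - 1) 0 (-1)).map
          (fun i => PySem.List.pyGetD ds i 0 - PySem.List.pyGetD ds (i - 1) 0))) == 1
       then true else false)
    = (PySem.List.pyRange 2 (PySem.List.len ds)).all
        (fun i => PySem.List.pyGetD ds i 0 - PySem.List.pyGetD ds (i - 1) 0 ==
          (PySem.List.pyGetD ds 1 0 - PySem.List.pyGetD ds 0 0)) := by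
  have hL : (2 : Int) ≤ PySem.List.len ds := by
    rw [PySem.List.len_eq]; exact_mod_cast h2
  set g : Int → Int := fun i => PySem.List.pyGetD ds i 0 - PySem.List.pyGetD ds (i - 1) 0 with hg
  have hif : ∀ (c : Bool), (if c = true then true else false) = c := by decide
  rw [hif, Bool.eq_iff_iff]
  have hrange : PySem.List.pyRange (PySem.List.len ds - 1) 0 (-1)
      = (PySem.List.pyRange 1 (PySem.List.len ds)).reverse := by
    rw [PySem.List.pyRange_neg_one_eq_reverse]
    norm_num
  have hcons : PySem.List.pyRange 1 (PySem.List.len ds)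
      = 1 :: PySem.List.pyRange 2 (PySem.List.len ds) := by
    rw [PySem.List.pyRange_one_cons (by omega : (1:Int) < PySem.List.len ds)]
    norm_num
  constructor
  · intro hA
    rw [beq_iff_eq, PySem.List.len_eq, hrange, List.map_reverse] at hA
    have hcard : ((PySem.List.pyRange 1 (PySem.List.len ds)).map g).toFinset.card = 1 := by
      have := hA
      rw [ofList_length_eq_toFinset_card] at this
      rw [← List.toFinset_reverse]
      exact_mod_cast this
    rw [hcons, List.map_cons] at hcard
    have hall := (cons_toFinset_card_eq_one _ _).mp hcard
    simp only [List.all_eq_true, beq_iff_eq]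
    intro i hi
    have : g i = g 1 := hall (g i) (List.mem_map_of_mem hi)
    simpa [hg] using this
  · intro hB
    simp only [List.all_eq_true, beq_iff_eq] at hB
    have hall : ∀ x ∈ (PySem.List.pyRange 2 (PySem.List.len ds)).map g, x = g 1 := by
      intro x hx
      rcases List.mem_map.mp hx with ⟨i, hi, rfl⟩
      have := hB i hi
      simpa [hg] using this
    have hcard : ((PySem.List.pyRange 1 (PySem.List.len ds)).map g).toFinset.card = 1 := by
      rw [hcons, List.map_cons]
      exact (cons_toFinset_card_eq_one _ _).mpr hall
    rw [beq_iff_eq, PySem.List.len_eq, hrange, List.map_reverse,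
      ofList_length_eq_toFinset_card, List.toFinset_reverse]
    exact_mod_cast hcard

-- B's affine reconstruction equals the same consecutive-difference condition.
lemma keyB (ds : List Int) (h2 : 2 ≤ ds.length) :
    (ds == (PySem.List.pyRange 0 (PySem.List.len ds)).map
        (fun i => PySem.List.pyGetD ds 0 0 +
          i * (PySem.List.pyGetD ds 1 0 - PySem.List.pyGetD ds 0 0)))
    = (PySem.List.pyRange 2 (PySem.List.len ds)).all
        (fun i => PySem.List.pyGetD ds i 0 - PySem.List.pyGetD ds (i - 1) 0 ==
          (PySem.List.pyGetD ds 1 0 - PySem.List.pyGetD ds 0 0)) := by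
  have hL : (2 : Int) ≤ PySem.List.len ds := by
    rw [PySem.List.len_eq]; exact_mod_cast h2
  set d : Int := PySem.List.pyGetD ds 1 0 - PySem.List.pyGetD ds 0 0 with hd
  have hget : ∀ (k : Nat) (hk : k < ds.length), PySem.List.pyGetD ds (k : Int) 0 = ds[k] := by
    intro k hk
    rw [PySem.List.pyGetD_eq_getElem ds (i := (k:Int)) 0 (Int.natCast_nonneg k)
      (by exact_mod_cast hk)]
    simp
  have hd0 : PySem.List.pyGetD ds 0 0 = ds[0]'(by omega) := by
    have := hget 0 (by omega); simpa using this
  have hd1 : PySem.List.pyGetD ds 1 0 = ds[1]'(by omega) := by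
    have := hget 1 (by omega); simpa using this
  rw [Bool.eq_iff_iff, beq_iff_eq, List.all_eq_true]
  constructor
  · intro hEq i hi
    rw [PySem.List.mem_pyRange_one] at hi
    obtain ⟨hi2, hin⟩ := hi
    -- pointwise consequence of the list equality
    have hpt : ∀ (k : Nat) (hk : k < ds.length),
        ds[k] = ds[0]'(by omega) + (k : Int) * d := by
      intro k hk
      have hlen : k < ((PySem.List.pyRange 0 (PySem.List.len ds)).map
          (fun i => PySem.List.pyGetD ds 0 0 + i * d)).length := by
        simp [PySem.List.length_pyRange_one, PySem.List.len_eq]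
        omega
      have := List.getElem_of_eq hEq hk
      rw [List.getElem_map, PySem.List.getElem_pyRange_one] at this
      rw [this, hd0]
      ring_nf
    have hik : i = ((i.toNat : Nat) : Int) := by omega
    have hik1 : i - 1 = (((i-1).toNat : Nat) : Int) := by omega
    have hk1 : i.toNat < ds.length := by
      rw [PySem.List.len_eq] at hin; omega
    have hk2 : (i-1).toNat < ds.length := by omega
    rw [beq_iff_eq, hik]
    have hsub : ((i.toNat : Nat) : Int) - 1 = ((i.toNat - 1 : Nat) : Int) := by omega
    have hk2' : i.toNat - 1 < ds.length := by omega
    rw [hsub, hget _ hk1, hget _ hk2', hpt _ hk1, hpt _ hk2']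
    have e2 : ((i.toNat - 1 : Nat) : Int) = ((i.toNat : Nat) : Int) - 1 := by omega
    rw [e2]; ring
  · intro hAll
    -- affine values by induction using the consecutive-difference facts
    have hpt : ∀ (k : Nat) (hk : k < ds.length),
        ds[k] = ds[0]'(by omega) + (k : Int) * d := by
      intro k
      induction k with
      | zero => intro hk; simp
      | succ k ih =>
        intro hk
        rcases Nat.eq_zero_or_pos k with rfl | hkpos
        · rw [hd, hd0, hd1]; push_cast; ring
        · have hmem : ((k+1 : Nat) : Int) ∈ PySem.List.pyRange 2 (PySem.List.len ds) := by
            rw [PySem.List.mem_pyRange_one, PySem.List.len_eq]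
            constructor
            · push_cast; omega
            · exact_mod_cast hk
          have hstep := hAll _ hmem
          rw [beq_iff_eq] at hstep
          have e1 : ((k+1 : Nat) : Int) - 1 = ((k : Nat) : Int) := by push_cast; ring
          rw [e1, hget _ hk, hget _ (by omega)] at hstep
          have ihk := ih (by omega)
          push_cast
          rw [show ds[k+1] = ds[k]'(by omega) + d by omega, ihk]
          ring
    apply List.ext_getElem
    · simp [PySem.List.length_pyRange_one, PySem.List.len_eq]
    · intro k hk hk'
      rw [List.getElem_map, PySem.List.getElem_pyRange_one, hpt _ hk, hd0]
      ring_nf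


-- ===== VERDICT (by name: the statement is the Claim_ definition above) =====
theorem func_spec : Claim_equal_func := by
  intro num _
  unfold Spec_func func func_alt
  by_cases h : num < 100
  · simp [h]
  · simp only [if_neg h]
    have h2 : 2 ≤ ((PySem.Int.toChars num).map
        (fun c => (PySem.Int.ofChars? [c]).getD 0)).length := by
      rw [List.length_map]
      exact toChars_two_le num (by omega)
    rw [keyA _ h2, keyB _ h2]
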